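-- pv_equiv track=rewrite | github.com/Vishalsng112/daisy | src_new/cli.py | insert_placeholders
-- ===== SOURCE A (Python) =====
-- def insert_placeholders(method_text: str, positions: list[int], placeholder: str) -> str:
--     lines = method_text.splitlines()
--     result: list[str] = []
--     for idx, line in enumerate(lines):
--         result.append(line)
--         if idx in positions:
--             result.append(placeholder)
--     return "\n".join(result)
-- ===== SOURCE B (Python) =====
-- def insert_placeholders(method_text: str, positions: list[int], placeholder: str) -> str:
--     lines = method_text.splitlines()
--     targets = sorted({p for p in positions if 0 <= p < len(lines)}, reverse=True)
--     for p in targets: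
--         lines.insert(p + 1, placeholder)
--     return "\n".join(lines)
-- ===== Notes on version B (the rewrite author's own statement) =====
-- stated objective: alternative
-- what changed: Instead of scanning every line and testing its index for membership in positions, B builds the deduplicated set of in-range target indices once, sorts it descending, and splices the placeholder in by direct list insertion at p+1.
import Mathlib
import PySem

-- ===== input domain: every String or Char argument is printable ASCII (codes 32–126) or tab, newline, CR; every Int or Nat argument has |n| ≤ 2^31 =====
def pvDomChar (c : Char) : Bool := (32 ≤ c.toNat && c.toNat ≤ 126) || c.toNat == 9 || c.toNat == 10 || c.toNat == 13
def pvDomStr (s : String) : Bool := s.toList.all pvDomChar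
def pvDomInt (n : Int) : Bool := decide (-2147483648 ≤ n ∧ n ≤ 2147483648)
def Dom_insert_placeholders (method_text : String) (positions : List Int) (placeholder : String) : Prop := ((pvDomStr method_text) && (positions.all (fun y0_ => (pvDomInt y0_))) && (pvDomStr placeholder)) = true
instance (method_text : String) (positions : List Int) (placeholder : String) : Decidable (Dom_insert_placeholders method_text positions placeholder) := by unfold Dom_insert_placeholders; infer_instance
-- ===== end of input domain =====

-- B: instead of scanning every line with a membership test, B collects the deduplicated in-range target indices, sorts them descending, and splices the placeholder in by list insertion; objective: alternative decomposition (same asymptotic cost here).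


-- ===== PORT A =====
def insert_placeholders (method_text : String) (positions : List Int) (placeholder : String) : String :=
  let lines := PySem.Str.splitlines method_text
  let result : List String := (PySem.List.enumerate lines 0).foldl
    (fun res q =>
      let res := res ++ [q.2]
      if q.1 ∈ positions then res ++ [placeholder] else res) []
  PySem.Str.join "\n" result

-- ===== PORT B =====
def insert_placeholders_alt (method_text : String) (positions : List Int) (placeholder : String) : String :=
  let lines := PySem.Str.splitlines method_text
  let targets := PySem.List.sorted
    (PySem.Set.ofList (positions.filter (fun p => decide (0 ≤ p) && decide (p < (lines.length : Int)))))
    (fun x => x) true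
  let lines := targets.foldl (fun ls p => PySem.List.insert ls (p + 1) placeholder) lines
  PySem.Str.join "\n" lines

-- ===== PRECONDITION & SPEC =====
def Spec_insert_placeholders (method_text : String) (positions : List Int) (placeholder : String) (out : String) : Prop := out = insert_placeholders_alt method_text positions placeholder
instance (method_text : String) (positions : List Int) (placeholder : String) (out : String) : Decidable (Spec_insert_placeholders method_text positions placeholder out) := by unfold Spec_insert_placeholders; infer_instance

-- ===== CLAIM (what is proved, stated in full; the proofs are below) =====
def Claim_equal_insert_placeholders : Prop := ∀ (method_text : String) (positions : List Int) (placeholder : String), Dom_insert_placeholders method_text positions placeholder → Spec_insert_placeholders method_text positions placeholder (insert_placeholders method_text positions placeholder)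

-- ===== LEMMAS AND PROOFS =====

def pvG (ph : String) (es : List Int) : Int × String → List String :=
  fun q => q.2 :: if q.1 ∈ es then [ph] else []

-- no-op region: all indices ≥ s, all es elements < s
theorem pvL1 (ph : String) (es : List Int) :
    ∀ (M : List String) (s : Int), (∀ q ∈ es, q < s) →
    (PySem.List.enumerate M s).flatMap (pvG ph es) = M := by
  intro M
  induction M with
  | nil => intro s h; simp [PySem.List.enumerate_nil]
  | cons x xs ih =>
      intro s h
      rw [PySem.List.enumerate_cons]
      simp only [List.flatMap_cons]
      have hs : s ∉ es := fun hm => absurd (h s hm) (lt_irrefl s)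
      rw [ih (s+1) (fun q hq => lt_trans (h q hq) (by omega))]
      simp [pvG, hs]

theorem pvL2 (ph : String) (es₁ es₂ : List Int) :
    ∀ (M : List String) (s : Int),
    (∀ i, s ≤ i → i < s + (M.length : Int) → (i ∈ es₁ ↔ i ∈ es₂)) →
    (PySem.List.enumerate M s).flatMap (pvG ph es₁) =
    (PySem.List.enumerate M s).flatMap (pvG ph es₂) := by
  intro M
  induction M with
  | nil => intro s h; simp [PySem.List.enumerate_nil]
  | cons x xs ih =>
      intro s h
      rw [PySem.List.enumerate_cons]
      simp only [List.flatMap_cons]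
      have hs : s ∈ es₁ ↔ s ∈ es₂ := h s le_rfl (by simp only [List.length_cons]; push_cast; omega)
      rw [ih (s+1) (fun i h1 h2 => h i (by omega) (by simp at h2 ⊢; omega))]
      by_cases hc : s ∈ es₁
      · simp [pvG, hc, hs.mp hc]
      · have : s ∉ es₂ := fun hc2 => hc (hs.mpr hc2)
        simp [pvG, hc, this]

def pvIns (ph : String) : List String → Int → List String :=
  fun ls p => PySem.List.insert ls (p + 1) ph

-- insert within bounds is take/drop
theorem pvInsertEq (ph : String) (L : List String) (p : Int) (h0 : 0 ≤ p)
    (h1 : p + 1 ≤ (L.length : Int)) :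
    pvIns ph L p = L.take (p.toNat + 1) ++ ph :: L.drop (p.toNat + 1) := by
  have hp : p = ((p.toNat : Nat) : Int) := by omega
  have : p + 1 = (((p.toNat + 1 : Nat)) : Int) := by omega
  rw [pvIns, this, PySem.List.insert_natCast L (p.toNat + 1) ph (by omega)]

-- folding inserts that all land inside the prefix L
theorem pvL3 (ph : String) :
    ∀ (ds : List Int) (L M : List String),
    (∀ q ∈ ds, 0 ≤ q ∧ q + 1 ≤ (L.length : Int)) →
    ds.foldl (pvIns ph) (L ++ M) = ds.foldl (pvIns ph) L ++ M := by
  intro ds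
  induction ds with
  | nil => intro L M _; simp
  | cons p ds ih =>
      intro L M h
      obtain ⟨h0, h1⟩ := h p (List.mem_cons_self)
      simp only [List.foldl_cons]
      have e1 : pvIns ph (L ++ M) p = pvIns ph L p ++ M := by
        rw [pvInsertEq ph (L ++ M) p h0 (by simp; omega), pvInsertEq ph L p h0 h1]
        have hle : p.toNat + 1 ≤ L.length := by omega
        rw [List.take_append_of_le_length hle, List.drop_append_of_le_length hle]
        simp
      rw [e1, ih (pvIns ph L p) M]
      intro q hq
      obtain ⟨q0, q1⟩ := h q (List.mem_cons_of_mem _ hq)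
      refine ⟨q0, ?_⟩
      rw [pvInsertEq ph L p h0 h1]
      simp
      omega

-- main: descending in-range inserts = the enumerate/flatMap form
theorem pvL4 (ph : String) :
    ∀ (ds : List Int) (L : List String),
    ds.Pairwise (fun a b => b < a) →
    (∀ q ∈ ds, 0 ≤ q ∧ q < (L.length : Int)) →
    ds.foldl (pvIns ph) L = (PySem.List.enumerate L 0).flatMap (pvG ph ds) := by
  intro ds
  induction ds with
  | nil =>
      intro L _ _
      simp only [List.foldl_nil]
      exact (pvL1 ph [] L 0 (by simp)).symm
  | cons p ds ih =>
      intro L hpw hms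
      rw [List.pairwise_cons] at hpw
      obtain ⟨hlt, hpw'⟩ := hpw
      obtain ⟨hp0, hpn⟩ := hms p List.mem_cons_self
      set k := p.toNat with hk
      have hkp : (k : Int) = p := by omega
      have hkn : k < L.length := by omega
      have hlen1 : (L.take (k+1)).length = k + 1 := by
        rw [List.length_take]; omega
      have htk : L.take (k+1) = L.take k ++ [L[k]] := by
        rw [List.take_add_one, List.getElem?_eq_getElem hkn]; rfl
      -- LHS
      simp only [List.foldl_cons]
      rw [pvInsertEq ph L p hp0 (by omega)]
      rw [pvL3 ph ds (L.take (k+1)) (ph :: L.drop (k+1))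
        (fun q hq => ⟨(hms q (List.mem_cons_of_mem _ hq)).1, by rw [hlen1]; have := hlt q hq; omega⟩)]
      rw [ih (L.take (k+1)) hpw'
        (fun q hq => ⟨(hms q (List.mem_cons_of_mem _ hq)).1, by rw [hlen1]; have := hlt q hq; omega⟩)]
      -- RHS
      conv_rhs => rw [← List.take_append_drop (k+1) L, PySem.List.enumerate_append, List.flatMap_append]
      rw [pvL1 ph (p :: ds) (L.drop (k+1)) (0 + ((L.take (k+1)).length : Int))
        (by intro q hq; rw [hlen1]; rcases List.mem_cons.mp hq with h | h
            · omega
            · have := hlt q h; omega)]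
      -- both take-parts
      rw [htk]
      rw [PySem.List.enumerate_append, List.flatMap_append, List.flatMap_append]
      have hnp : p ∉ ds := fun h => absurd (hlt p h) (lt_irrefl p)
      have hlen0 : ((L.take k).length : Int) = (k : Int) := by
        rw [List.length_take]; simp; omega
      have hcongr : (PySem.List.enumerate (L.take k) 0).flatMap (pvG ph ds)
          = (PySem.List.enumerate (L.take k) 0).flatMap (pvG ph (p :: ds)) := by
        apply pvL2
        intro i h1 h2
        rw [hlen0] at h2
        simp only [List.mem_cons]
        constructor
        · exact fun h => Or.inr h
        · rintro (h | h)
          · omega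
          · exact h
      rw [hcongr]
      -- last singletons
      simp only [PySem.List.enumerate_cons, PySem.List.enumerate_nil, List.flatMap_cons,
        List.flatMap_nil, pvG]
      rw [hlen0]
      simp [hkp, hnp]

theorem pvMain (method_text : String) (positions : List Int) (placeholder : String) :
    insert_placeholders method_text positions placeholder
      = insert_placeholders_alt method_text positions placeholder := by
  simp only [insert_placeholders, insert_placeholders_alt]
  set lines := PySem.Str.splitlines method_text with hl
  set ds := PySem.List.sorted
    (PySem.Set.ofList (positions.filter (fun p => decide (0 ≤ p) && decide (p < (lines.length : Int)))))
    (fun x => x) true with hds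
  have hmem : ∀ q : Int, q ∈ ds ↔ (q ∈ positions ∧ 0 ≤ q ∧ q < (lines.length : Int)) := by
    intro q
    rw [hds, PySem.List.mem_sorted, PySem.Set.mem_ofList, List.mem_filter]
    simp only [Bool.and_eq_true, decide_eq_true_eq]
  have hnd : ds.Nodup := by
    rw [hds]
    exact (PySem.List.sorted_perm _ _ _).nodup_iff.mpr (PySem.Set.nodup_ofList _)
  have hpair : ds.Pairwise (fun a b => b < a) := by
    have h1 := PySem.List.sorted_pairwise_rev
      (PySem.Set.ofList (positions.filter (fun p => decide (0 ≤ p) && decide (p < (lines.length : Int)))))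
      (fun x => x)
    rw [← hds] at h1
    exact (h1.and hnd).imp (fun {a b} h => lt_of_le_of_ne h.1 (fun he => h.2 he.symm))
  -- A's loop is a flatMap
  have hA : (PySem.List.enumerate lines 0).foldl
      (fun res q =>
        let res := res ++ [q.2]
        if q.1 ∈ positions then res ++ [placeholder] else res) []
      = (PySem.List.enumerate lines 0).flatMap (pvG placeholder positions) := by
    have hf : (fun (res : List String) (q : Int × String) =>
        let res := res ++ [q.2]
        if q.1 ∈ positions then res ++ [placeholder] else res)
        = fun res q => res ++ pvG placeholder positions q := by
      funext res q
      by_cases hc : q.1 ∈ positions <;> simp [pvG, hc]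
    rw [hf, PySem.List.foldl_append_eq_flatMap]
    simp
  -- B's loop is the same flatMap
  have hB : ds.foldl (fun ls p => PySem.List.insert ls (p + 1) placeholder) lines
      = (PySem.List.enumerate lines 0).flatMap (pvG placeholder positions) := by
    have : (fun (ls : List String) (p : Int) => PySem.List.insert ls (p + 1) placeholder)
        = pvIns placeholder := rfl
    rw [this, pvL4 placeholder ds lines hpair (fun q hq => ((hmem q).mp hq).2)]
    exact (pvL2 placeholder positions ds lines 0
      (fun i h1 h2 => by rw [hmem i]; constructor
                         · exact fun h => ⟨h, h1, by omega⟩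
                         · exact fun h => h.1)).symm
  rw [hA, hB]

-- ===== VERDICT (by name: the statement is the Claim_ definition above) =====
theorem insert_placeholders_spec : Claim_equal_insert_placeholders := by
  intro method_text positions placeholder _
  unfold Spec_insert_placeholders
  exact pvMain method_text positions placeholder
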